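-- pv_equiv track=rewrite | github.com/haraGADygyl/the-big-book-of-small-python-projects | 02-birthday-paradox/birthday_paradox.py | get_match
-- ===== SOURCE A (Python) =====
-- def get_match(bdays):
--     """ Returns the date object of a birthday that occurs more than once in the birthday list. """
--     if len(bdays) == len(set(bdays)):
--         return None
--
--     """ Compare each birthday to every other birthday. """
--     for a, birthday_a in enumerate(bdays):
--         for b, birthday_b in enumerate(bdays[a + 1:]):
--             if birthday_a == birthday_b:
--                 """ Return the matching  birthday. """
--                 return birthday_a
-- ===== SOURCE B (Python) =====
-- from collections import Counter
--
--
-- def get_match(bdays):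
--     """ Returns the date object of a birthday that occurs more than once in the birthday list. """
--     counts = Counter(bdays)
--     for b in bdays:
--         if counts[b] > 1:
--             return b
--     return None
-- ===== Notes on version B (the rewrite author's own statement) =====
-- stated objective: idiomatic
-- what changed: Replaces the set-size guard plus nested enumerate/slice scans with a Counter frequency table built once and a single forward pass returning the first element whose count exceeds 1.
import Mathlib
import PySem

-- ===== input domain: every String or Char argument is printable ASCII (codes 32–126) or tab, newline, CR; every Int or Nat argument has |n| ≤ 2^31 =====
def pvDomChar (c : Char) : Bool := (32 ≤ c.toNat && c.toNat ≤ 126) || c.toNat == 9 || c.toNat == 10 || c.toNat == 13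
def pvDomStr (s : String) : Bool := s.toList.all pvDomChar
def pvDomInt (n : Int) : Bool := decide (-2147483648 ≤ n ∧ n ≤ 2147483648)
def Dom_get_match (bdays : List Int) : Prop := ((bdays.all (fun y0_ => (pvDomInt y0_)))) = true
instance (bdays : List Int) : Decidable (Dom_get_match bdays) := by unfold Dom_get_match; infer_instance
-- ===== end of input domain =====

-- B replaces A's set-size guard plus nested scans by a Counter table and one forward pass (idiomatic).


-- ===== PORT A =====
-- inner loop: 'for birthday_b in bdays[a+1:]' — for the element at index a, bdays[a+1:]
-- is exactly the tail after it, so the outer enumerate loop is structural recursion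
-- carrying the tail; returns the current element as soon as the tail contains it.
def getMatchScanA : List Int → Option Int
  | [] => none
  | x :: rest => if rest.contains x then some x else getMatchScanA rest

def get_match (bdays : List Int) : Option Int :=
  if bdays.length = (PySem.Set.ofList bdays).length then none
  else getMatchScanA bdays

-- ===== PORT B =====
def get_match_alt (bdays : List Int) : Option Int :=
  let counts := PySem.Dict.counter bdays
  bdays.find? (fun b => decide ((1 : Int) < counts.getD b 0))

-- ===== PRECONDITION & SPEC =====
def Spec_get_match (bdays : List Int) (out : Option Int) : Prop := out = get_match_alt bdays
instance (bdays : List Int) (out : Option Int) : Decidable (Spec_get_match bdays out) := by unfold Spec_get_match; infer_instance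

-- ===== CLAIM (what is proved, stated in full; the proofs are below) =====
def Claim_equal_get_match : Prop := ∀ (bdays : List Int), Dom_get_match bdays → Spec_get_match bdays (get_match bdays)

-- ===== LEMMAS AND PROOFS =====

-- length of set(xs) equals length of xs only when xs has no duplicates
theorem nodup_of_length_ofList (xs : List Int)
    (h : xs.length = (PySem.Set.ofList xs).length) : xs.Nodup := by
  induction xs with
  | nil => exact List.nodup_nil
  | cons x t ih =>
    rw [PySem.Set.ofList_cons] at h
    simp only [List.length_cons, Nat.add_right_cancel_iff] at h
    by_cases hx : x ∈ PySem.Set.ofList t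
    · exfalso
      have hlt : ((PySem.Set.ofList t).discard x).length < (PySem.Set.ofList t).length := by
        simp only [PySem.Set.discard]
        rw [List.length_filter_lt_length_iff_exists]
        exact ⟨x, hx, by simp⟩
      have := PySem.Set.length_ofList_le t
      omega
    · have hd : (PySem.Set.ofList t).discard x = PySem.Set.ofList t := by
        simp only [PySem.Set.discard]
        apply List.filter_eq_self.mpr
        intro y hy
        simpa using fun (hyx : y = x) => hx (hyx ▸ hy)
      rw [hd] at h
      have ht := ih h
      refine List.Nodup.cons ?_ ht
      intro hxt
      exact hx ((PySem.Set.mem_ofList t x).mpr hxt)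

-- A's scan over a suffix equals B's count-based find, given that every element
-- already passed (in `pre`) occurs exactly once in the full list.
theorem scanA_eq_find (suf : List Int) : ∀ (pre full : List Int),
    full = pre ++ suf → (∀ y ∈ pre, full.count y = 1) →
    getMatchScanA suf = suf.find? (fun b => decide ((1 : Int) < (full.count b : Int))) := by
  induction suf with
  | nil => intro _ _ _ _; rfl
  | cons x rest ih =>
    intro pre full hfull hinv
    by_cases hx : x ∈ rest
    · have hc : (1 : Int) < (full.count x : Int) := by
        have : 2 ≤ full.count x := by
          rw [hfull, List.count_append, List.count_cons_self]
          have := (List.one_le_count_iff (a := x)).mpr hx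
          omega
        exact_mod_cast by omega
      simp [getMatchScanA, List.find?, hx, hc]
    · have hc1 : full.count x = 1 := by
        by_cases hp : x ∈ pre
        · exact hinv x hp
        · rw [hfull, List.count_append, List.count_cons_self,
            List.count_eq_zero_of_not_mem hp, List.count_eq_zero_of_not_mem hx]
      have hnc : ¬ ((1 : Int) < (full.count x : Int)) := by
        rw [hc1]; norm_num
      have hrec := ih (pre ++ [x]) full (by simp [hfull]) ?_
      · simp [getMatchScanA, List.find?, hx, hnc, hrec]
      · intro y hy
        rcases List.mem_append.mp hy with h | h
        · exact hinv y h
        · simp only [List.mem_singleton] at h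
          exact h ▸ hc1

theorem scan_eq_alt (bdays : List Int) :
    getMatchScanA bdays
      = bdays.find? (fun b => decide ((1 : Int) < (bdays.count b : Int))) :=
  scanA_eq_find bdays [] bdays rfl (by simp)

-- ===== VERDICT (by name: the statement is the Claim_ definition above) =====
theorem get_match_spec : Claim_equal_get_match := by
  intro bdays _
  unfold Spec_get_match get_match get_match_alt
  have halt : (fun b => decide ((1 : Int) < (PySem.Dict.counter bdays).getD b 0))
      = (fun b => decide ((1 : Int) < (bdays.count b : Int))) := by
    funext b; rw [PySem.Dict.getD_counter]
  show _ = List.find? (fun b => decide ((1 : Int) < (PySem.Dict.counter bdays).getD b 0)) bdays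
  rw [halt]
  split_ifs with h
  · have hnd := nodup_of_length_ofList bdays h
    have hnone : bdays.find? (fun b => decide ((1 : Int) < (bdays.count b : Int))) = none := by
      rw [List.find?_eq_none]
      intro b hb
      have := (List.nodup_iff_count_le_one.mp hnd) b
      simp only [decide_eq_true_eq, not_lt]
      exact_mod_cast this
    exact hnone.symm
  · exact scan_eq_alt bdays
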